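-- pv_equiv track=rewrite | github.com/nonstopnone/uk-newsbot | newsbot.py | get_relevance_level
-- ===== SOURCE A (Python) =====
-- strong_uk_keywords = [
--     "uk", "britain", "united kingdom", "england", "scotland", "wales", "northern ireland",
--     "london", "manchester", "birmingham", "glasgow", "edinburgh", "cardiff", "belfast",
--     "liverpool", "leeds", "bristol", "newcastle", "sheffield", "nottingham", "brighton",
--     "southampton", "plymouth", "hull", "derby", "oxford", "cambridge"
-- ]
--
-- def get_relevance_level(score, matched_keywords):
--     has_strong_uk = any(kw in matched_keywords for kw in strong_uk_keywords)
--     if score >= 10: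
--         level = "Very High"
--     elif score >= 7 or has_strong_uk:
--         level = "High"
--     elif score >= 4:
--         level = "Medium"
--     elif score >= 2:
--         level = "Low"
--     else:
--         level = "Very Low"
--     return level
-- ===== SOURCE B (Python) =====
-- strong_uk_keywords = [
--     "uk", "britain", "united kingdom", "england", "scotland", "wales", "northern ireland",
--     "london", "manchester", "birmingham", "glasgow", "edinburgh", "cardiff", "belfast",
--     "liverpool", "leeds", "bristol", "newcastle", "sheffield", "nottingham", "brighton",
--     "southampton", "plymouth", "hull", "derby", "oxford", "cambridge"
-- ]
--
-- _LEVELS = ["Very Low", "Low", "Medium", "High", "Very High"]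
-- _THRESHOLDS = [2, 4, 7, 10]
--
-- def get_relevance_level(score, matched_keywords):
--     base = sum(1 for t in _THRESHOLDS if score >= t)
--     if any(kw in matched_keywords for kw in strong_uk_keywords):
--         base = max(base, 3)
--     return _LEVELS[base]
-- ===== Notes on version B (the rewrite author's own statement) =====
-- stated objective: simpler
-- what changed: Replaces the five-branch if/elif cascade by a data-driven table lookup: count the thresholds [2,4,7,10] the score reaches, bump the index to at least 3 (High) when a strong UK keyword matched, and index into the ordered level list.
import Mathlib
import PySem

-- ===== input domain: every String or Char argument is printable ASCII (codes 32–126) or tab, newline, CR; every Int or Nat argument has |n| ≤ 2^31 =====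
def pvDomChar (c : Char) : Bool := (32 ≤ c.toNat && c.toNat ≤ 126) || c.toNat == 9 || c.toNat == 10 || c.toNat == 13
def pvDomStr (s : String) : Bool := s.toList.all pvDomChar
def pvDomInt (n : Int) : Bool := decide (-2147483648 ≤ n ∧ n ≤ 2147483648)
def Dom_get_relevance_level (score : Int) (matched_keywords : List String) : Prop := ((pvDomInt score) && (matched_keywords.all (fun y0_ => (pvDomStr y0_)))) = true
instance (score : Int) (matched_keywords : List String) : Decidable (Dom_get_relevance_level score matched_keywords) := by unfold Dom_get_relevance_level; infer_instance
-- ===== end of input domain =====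

-- ===== PORT A =====
def strong_uk_keywords : List String := [
    "uk", "britain", "united kingdom", "england", "scotland", "wales", "northern ireland",
    "london", "manchester", "birmingham", "glasgow", "edinburgh", "cardiff", "belfast",
    "liverpool", "leeds", "bristol", "newcastle", "sheffield", "nottingham", "brighton",
    "southampton", "plymouth", "hull", "derby", "oxford", "cambridge"]

-- B changes decomposition only (cascade -> threshold table); not faster, simpler to extend.
def get_relevance_level (score : Int) (matched_keywords : List String) : String :=
  let has_strong_uk := strong_uk_keywords.any (fun kw => matched_keywords.contains kw)
  let level :=
    if score ≥ 10 then "Very High"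
    else if score ≥ 7 || has_strong_uk then "High"
    else if score ≥ 4 then "Medium"
    else if score ≥ 2 then "Low"
    else "Very Low"
  level

-- ===== PORT B =====
def pvLevelsB : List String := ["Very Low", "Low", "Medium", "High", "Very High"]
def pvThresholdsB : List Int := [2, 4, 7, 10]

def get_relevance_level_alt (score : Int) (matched_keywords : List String) : String :=
  let base := pvThresholdsB.countP (fun t => score ≥ t)
  let idx := if strong_uk_keywords.any (fun kw => matched_keywords.contains kw)
             then max base 3 else base
  pvLevelsB.getD idx "Very Low"

-- ===== PRECONDITION & SPEC =====
def Spec_get_relevance_level (score : Int) (matched_keywords : List String) (out : String) : Prop := out = get_relevance_level_alt score matched_keywords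
instance (score : Int) (matched_keywords : List String) (out : String) : Decidable (Spec_get_relevance_level score matched_keywords out) := by unfold Spec_get_relevance_level; infer_instance

-- ===== CLAIM (what is proved, stated in full; the proofs are below) =====
def Claim_equal_get_relevance_level : Prop := ∀ (score : Int) (matched_keywords : List String), Dom_get_relevance_level score matched_keywords → Spec_get_relevance_level score matched_keywords (get_relevance_level score matched_keywords)

-- ===== LEMMAS AND PROOFS =====

lemma countP_base (score : Int) :
    pvThresholdsB.countP (fun t => score ≥ t) =
      if score ≥ 10 then 4 else if score ≥ 7 then 3 else
      if score ≥ 4 then 2 else if score ≥ 2 then 1 else 0 := by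
  simp only [pvThresholdsB, List.countP_cons, List.countP_nil, decide_eq_true_eq, ge_iff_le]
  split_ifs <;> omega

-- ===== VERDICT (by name: the statement is the Claim_ definition above) =====
theorem get_relevance_level_spec : Claim_equal_get_relevance_level := by
  intro score matched_keywords _
  simp only [Spec_get_relevance_level, get_relevance_level, get_relevance_level_alt, countP_base]
  generalize (strong_uk_keywords.any fun kw => matched_keywords.contains kw) = b
  cases b <;> split_ifs <;> simp_all [pvLevelsB]
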